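-- pv_equiv track=rewrite | github.com/karthiktadepalli1/choice-mechanism-tester | mechs.py | FewestVetos
-- ===== SOURCE A (Python) =====
-- def createDistributions(rankVectors):
--     """
--     A helper function for our voting mechanisms that creates rank distributions
--     @param rankVectors - the list of rank vectors of each voter
--     """
--     rankDistribs = []
--     numCandidates = len(rankVectors[0])
--     # each element = list of rank distribs drawn from each voter's rank vector
--     for i in range(numCandidates):
--         distributionList = []
--         for rankVector in rankVectors:
--             distributionList.append(rankVector[i])
--         rankDistribs.append(distributionList)
--     return(rankDistribs)
--
-- def FewestVetos(rankVectors, vetoThreshold):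
--     """
--     Mechanism: veto minimization, ties broken by lower rank sum.
--     @param rankVectors - the list of rank vectors of each voter
--     @param vetoThreshold - the rank a candidate must be given to be considered
--     vetoed by the voter (higher number = worse rank)
--     """
--     rankDistribs = createDistributions(rankVectors)
--     vetoCounters = []
--     vetoThreshold -= 1  # to account for indexing
--     for distribution in rankDistribs:
--         vetos = [i for i in distribution if i >= vetoThreshold]
--         vetoCounters.append(len(vetos))
--
--     minim = min(vetoCounters)
--     indices = [i for i, x in enumerate(vetoCounters) if x == minim]
--
--     if len(indices) == 1:
--         rightIndex = indices[0]
--         # strictly fewer vetos => the candidate is the optimal candidate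
--     else:
--         sums = []
--         for index in indices:
--             sums.append(sum(rankDistribs[index]))
--         # we break veto ties in favour of the lower rank sum
--         rightIndex = indices[sums.index(min(sums))]
--
--     optimal = rankDistribs[rightIndex]
--     return(optimal)
-- ===== SOURCE B (Python) =====
-- def FewestVetos(rankVectors, vetoThreshold):
--     """
--     Mechanism: veto minimization, ties broken by lower rank sum.
--     Single pass over candidates keeping a running lexicographic-best
--     (vetos, rank sum) key; no intermediate distribution/counter lists.
--     """
--     numCandidates = len(rankVectors[0])
--     threshold = vetoThreshold - 1  # to account for indexing
--     best = None
--     bestKey = None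
--     for i in range(numCandidates):
--         vetos = 0
--         total = 0
--         for rankVector in rankVectors:
--             r = rankVector[i]
--             total += r
--             if r >= threshold:
--                 vetos += 1
--         key = (vetos, total)
--         if best is None or key < bestKey:
--             best, bestKey = i, key
--     return [rankVector[best] for rankVector in rankVectors]
-- ===== Notes on version B (the rewrite author's own statement) =====
-- stated objective: simpler
-- what changed: Drops createDistributions and all intermediate lists (rankDistribs, vetoCounters, indices, sums): one pass over candidates keeps a running lexicographically-least (vetos, rank sum) key, replacing A's min/enumerate-filter/index multi-stage tie-break.
import Mathlib
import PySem

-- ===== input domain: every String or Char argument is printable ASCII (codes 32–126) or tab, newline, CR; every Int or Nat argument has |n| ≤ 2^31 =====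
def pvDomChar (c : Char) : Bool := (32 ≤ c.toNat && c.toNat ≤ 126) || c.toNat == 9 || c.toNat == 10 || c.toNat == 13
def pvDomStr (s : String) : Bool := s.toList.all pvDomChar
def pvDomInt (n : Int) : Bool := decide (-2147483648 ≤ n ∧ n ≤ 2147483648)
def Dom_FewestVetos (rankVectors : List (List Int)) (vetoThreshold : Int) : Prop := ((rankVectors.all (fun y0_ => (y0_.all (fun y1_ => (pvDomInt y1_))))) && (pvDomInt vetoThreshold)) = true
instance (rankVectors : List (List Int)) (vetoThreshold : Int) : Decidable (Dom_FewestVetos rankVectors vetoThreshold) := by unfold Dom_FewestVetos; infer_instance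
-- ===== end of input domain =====

-- B replaces A's distribution/counter/index lists by a single pass keeping a running
-- lexicographic-best (vetos, rank sum) key; same return value on Pre_ (simpler decomposition).


-- ===== PORT A =====
-- 'rankVectors[0]', 'rankVector[i]', 'rankDistribs[index]' are pyGetD with a default;
-- Pre_FewestVetos keeps every index in range, exactly where Python does not raise.
def createDistributions (rankVectors : List (List Int)) : List (List Int) :=
  let numCandidates := (PySem.List.pyGetD rankVectors 0 ([] : List Int)).length
  (PySem.List.pyRange 0 (numCandidates : Int) 1).foldl
    (fun rankDistribs i =>
      rankDistribs ++ [rankVectors.foldl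
        (fun distributionList rankVector =>
          distributionList ++ [PySem.List.pyGetD rankVector i 0]) []]) []

def FewestVetos (rankVectors : List (List Int)) (vetoThreshold : Int) : List Int :=
  let rankDistribs := createDistributions rankVectors
  let vetoThreshold' := vetoThreshold - 1
  let vetoCounters := rankDistribs.foldl
    (fun acc distribution =>
      acc ++ [((distribution.filter (fun i => vetoThreshold' ≤ i)).length : Int)]) []
  let minim := (PySem.List.min? vetoCounters (fun x => x)).getD 0
  let indices := ((PySem.List.enumerate vetoCounters).filter (fun p => p.2 == minim)).map (fun p => p.1)
  let rightIndex :=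
    if indices.length = 1 then indices.headD 0
    else
      let sums := indices.foldl
        (fun acc index => acc ++ [(PySem.List.pyGetD rankDistribs index []).sum]) []
      let minimSum := (PySem.List.min? sums (fun x => x)).getD 0
      PySem.List.pyGetD indices (((PySem.List.index? sums minimSum).getD 0 : Nat) : Int) 0
  PySem.List.pyGetD rankDistribs rightIndex []

-- ===== PORT B =====
-- Python tuple '<' on (vetos, total) is lexicographic.
def pyLexLt (a b : Int × Int) : Bool := a.1 < b.1 || (a.1 == b.1 && a.2 < b.2)

def FewestVetos_alt (rankVectors : List (List Int)) (vetoThreshold : Int) : List Int :=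
  let numCandidates := (PySem.List.pyGetD rankVectors 0 ([] : List Int)).length
  let threshold := vetoThreshold - 1
  let best := (PySem.List.pyRange 0 (numCandidates : Int) 1).foldl
    (fun (st : Option (Int × (Int × Int))) i =>
      let key := rankVectors.foldl
        (fun (p : Int × Int) rankVector =>
          (p.1 + (if threshold ≤ PySem.List.pyGetD rankVector i 0 then 1 else 0),
           p.2 + PySem.List.pyGetD rankVector i 0)) (0, 0)
      match st with
      | none => some (i, key)
      | some (b, bk) => if pyLexLt key bk then some (i, key) else some (b, bk)) none
  match best with
  | none => []   -- unreachable under Pre_ (Python B raises here: numCandidates = 0)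
  | some (b, _) => rankVectors.map (fun rankVector => PySem.List.pyGetD rankVector b 0)

-- ===== PRECONDITION & SPEC =====
-- Pre_ excludes exactly the inputs where Python A raises: empty rankVectors / empty first
-- rank vector (IndexError / ValueError on min([])), and rank vectors shorter than the
-- first one (IndexError on rankVector[i]).
def Pre_FewestVetos (rankVectors : List (List Int)) (vetoThreshold : Int) : Prop :=
  rankVectors ≠ [] ∧ (rankVectors.headD []) ≠ [] ∧
    ∀ r ∈ rankVectors, (rankVectors.headD []).length ≤ r.length
instance (rankVectors : List (List Int)) (vetoThreshold : Int) : Decidable (Pre_FewestVetos rankVectors vetoThreshold) := by unfold Pre_FewestVetos; infer_instance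

def pvWitness_FewestVetos : List (List Int) × Int := ([[1, 2], [2, 1], [1, 2]], 2)

def Spec_FewestVetos (rankVectors : List (List Int)) (vetoThreshold : Int) (out : List Int) : Prop := out = FewestVetos_alt rankVectors vetoThreshold
instance (rankVectors : List (List Int)) (vetoThreshold : Int) (out : List Int) : Decidable (Spec_FewestVetos rankVectors vetoThreshold out) := by unfold Spec_FewestVetos; infer_instance

-- ===== CLAIM (what is proved, stated in full; the proofs are below) =====
def Claim_equal_FewestVetos : Prop := ∀ (rankVectors : List (List Int)) (vetoThreshold : Int), Dom_FewestVetos rankVectors vetoThreshold → Pre_FewestVetos rankVectors vetoThreshold → Spec_FewestVetos rankVectors vetoThreshold (FewestVetos rankVectors vetoThreshold)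

-- ===== LEMMAS AND PROOFS =====

-- the column of candidate i, and its (veto count, rank sum) key
def colF (rankVectors : List (List Int)) (i : Int) : List Int :=
  rankVectors.map (fun r => PySem.List.pyGetD r i 0)

def keyF (rankVectors : List (List Int)) (t : Int) (i : Int) : Int × Int :=
  (((colF rankVectors i).map (fun r => if t ≤ r then (1 : Int) else 0)).sum,
   (colF rankVectors i).sum)

def LexLe (a b : Int × Int) : Prop := a.1 < b.1 ∨ (a.1 = b.1 ∧ a.2 ≤ b.2)
def LexLt (a b : Int × Int) : Prop := a.1 < b.1 ∨ (a.1 = b.1 ∧ a.2 < b.2)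

theorem pyLexLt_iff (a b : Int × Int) : pyLexLt a b = true ↔ LexLt a b := by
  simp [pyLexLt, LexLt]

-- first index (left to right) of the lexicographically least key among 0..n-1
def bestUpto (g : Int → Int × Int) : Nat → Int
  | 0 => 0
  | n + 1 =>
    if n = 0 then 0
    else
      let b := bestUpto g n
      if pyLexLt (g (n : Int)) (g b) then (n : Int) else b


theorem LexLe_refl (a : Int × Int) : LexLe a a := by simp [LexLe]

theorem LexLe_of_not_lt {a b : Int × Int} (h : ¬ LexLt a b) : LexLe b a := by
  obtain ⟨a1, a2⟩ := a; obtain ⟨b1, b2⟩ := b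
  simp only [LexLt, LexLe] at *; omega

theorem LexLt_le_trans {a b c : Int × Int} (h1 : LexLt a b) (h2 : LexLe b c) : LexLt a c := by
  obtain ⟨a1, a2⟩ := a; obtain ⟨b1, b2⟩ := b; obtain ⟨c1, c2⟩ := c
  simp only [LexLt, LexLe] at *; omega

theorem LexLe_of_lt {a b : Int × Int} (h : LexLt a b) : LexLe a b := by
  obtain ⟨a1, a2⟩ := a; obtain ⟨b1, b2⟩ := b
  simp only [LexLt, LexLe] at *; omega

theorem LexLe_fst {a b : Int × Int} (h : LexLe a b) : a.1 ≤ b.1 := by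
  obtain ⟨a1, a2⟩ := a; obtain ⟨b1, b2⟩ := b
  simp only [LexLe] at *; omega

theorem LexLe_snd_of_fst_eq {a b : Int × Int} (h : LexLe a b) (he : a.1 = b.1) : a.2 ≤ b.2 := by
  obtain ⟨a1, a2⟩ := a; obtain ⟨b1, b2⟩ := b
  simp only [LexLe] at *; omega

theorem LexLt_snd_of_fst_eq {a b : Int × Int} (h : LexLt a b) (he : a.1 = b.1) : a.2 < b.2 := by
  obtain ⟨a1, a2⟩ := a; obtain ⟨b1, b2⟩ := b
  simp only [LexLt] at *; omega

theorem bestUpto_spec (g : Int → Int × Int) :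
    ∀ n : Nat, 1 ≤ n →
      (0 ≤ bestUpto g n ∧ bestUpto g n < (n : Int)) ∧
      (∀ j : Int, 0 ≤ j → j < (n : Int) → LexLe (g (bestUpto g n)) (g j)) ∧
      (∀ j : Int, 0 ≤ j → j < bestUpto g n → LexLt (g (bestUpto g n)) (g j)) := by
  intro n
  induction n with
  | zero => omega
  | succ n ih =>
    intro _
    by_cases hn : n = 0
    · subst hn
      refine ⟨⟨by simp [bestUpto], by simp [bestUpto]⟩, ?_, ?_⟩
      · intro j hj0 hj1
        have : j = 0 := by omega
        subst this; simp [bestUpto, LexLe_refl]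
      · intro j hj0 hj1
        simp [bestUpto] at hj1; omega
    · have h1n : 1 ≤ n := by omega
      obtain ⟨⟨hb0, hbn⟩, hle, hlt⟩ := ih h1n
      have hdef : bestUpto g (n + 1) =
          if pyLexLt (g (n : Int)) (g (bestUpto g n)) then (n : Int) else bestUpto g n := by
        conv_lhs => rw [bestUpto]
        simp [hn]
      by_cases hc : pyLexLt (g (n : Int)) (g (bestUpto g n)) = true
      · have hlt' : LexLt (g (n : Int)) (g (bestUpto g n)) := (pyLexLt_iff _ _).mp hc
        rw [hdef, if_pos hc]
        refine ⟨⟨by exact_mod_cast Nat.zero_le n, by push_cast; omega⟩, ?_, ?_⟩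
        · intro j hj0 hjn
          by_cases hje : j = (n : Int)
          · subst hje; exact LexLe_refl _
          · have : j < (n : Int) := by omega
            exact LexLe_of_lt (LexLt_le_trans hlt' (hle j hj0 this))
        · intro j hj0 hjn
          exact LexLt_le_trans hlt' (hle j hj0 hjn)
      · have hle' : LexLe (g (bestUpto g n)) (g (n : Int)) :=
          LexLe_of_not_lt (fun h => hc ((pyLexLt_iff _ _).mpr h))
        rw [hdef, if_neg hc]
        refine ⟨⟨hb0, by push_cast; omega⟩, ?_, hlt⟩
        intro j hj0 hjn
        by_cases hje : j = (n : Int)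
        · subst hje; exact hle'
        · exact hle j hj0 (by omega)

-- B's running-best fold over range(n) computes bestUpto
theorem foldB (g : Int → Int × Int) :
    ∀ n : Nat, 1 ≤ n →
      (PySem.List.pyRange 0 (n : Int) 1).foldl
        (fun (st : Option (Int × (Int × Int))) i =>
          match st with
          | none => some (i, g i)
          | some (b, bk) => if pyLexLt (g i) bk then some (i, g i) else some (b, bk)) none
      = some (bestUpto g n, g (bestUpto g n)) := by
  intro n
  induction n with
  | zero => omega
  | succ n ih =>
    intro _
    by_cases hn : n = 0
    · subst hn
      rw [show ((1 : Nat) : Int) = 0 + 1 by omega, PySem.List.pyRange_one_singleton]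
      simp [bestUpto]
    · have h1n : 1 ≤ n := by omega
      have hsplit : PySem.List.pyRange 0 ((n : Nat) + 1 : Int) 1 =
          PySem.List.pyRange 0 (n : Int) 1 ++ [(n : Int)] :=
        PySem.List.pyRange_one_succ_right (by exact_mod_cast Nat.zero_le n)
      rw [show (((n + 1 : Nat)) : Int) = ((n : Nat) + 1 : Int) by push_cast; ring, hsplit,
        List.foldl_append, ih h1n]
      have hdef : bestUpto g (n + 1) =
          if pyLexLt (g (n : Int)) (g (bestUpto g n)) then (n : Int) else bestUpto g n := by
        conv_lhs => rw [bestUpto]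
        simp [hn]
      by_cases hc : pyLexLt (g (n : Int)) (g (bestUpto g n)) = true
      · simp [hc, hdef]
      · simp only [List.foldl_cons, List.foldl_nil]
        rw [hdef, if_neg hc]
        simp only [Bool.not_eq_true] at hc
        simp [hc]

-- the key of candidate i as B computes it
theorem fold_key (rankVectors : List (List Int)) (t : Int) (i : Int) :
    rankVectors.foldl
      (fun (p : Int × Int) rankVector =>
        (p.1 + (if t ≤ PySem.List.pyGetD rankVector i 0 then 1 else 0),
         p.2 + PySem.List.pyGetD rankVector i 0)) (0, 0) = keyF rankVectors t i := by
  rw [PySem.List.foldl_prod_mk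
    (fun s r => s + (if t ≤ PySem.List.pyGetD r i 0 then 1 else 0))
    (fun s r => s + PySem.List.pyGetD r i 0)]
  rw [PySem.List.foldl_add, PySem.List.foldl_add]
  simp [keyF, colF, List.map_map, Function.comp_def]

-- veto count as A computes it equals the first key component
theorem filter_len_eq_key1 (rankVectors : List (List Int)) (t i : Int) :
    ((((colF rankVectors i).filter (fun r => t ≤ r)).length : Int)) =
      (keyF rankVectors t i).1 := by
  rw [show (keyF rankVectors t i).1 =
      ((colF rankVectors i).map (fun r => if t ≤ r then (1 : Int) else 0)).sum from rfl]
  rw [show (fun r => if t ≤ r then (1 : Int) else 0) =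
      (fun r => if (decide (t ≤ r)) = true then (1 : Int) else 0) by funext r; simp]
  rw [PySem.List.sum_map_ite_one_zero]
  simp [List.countP_eq_length_filter]

theorem min?_id_eq {l : List Int} {c : Int} (hc : c ∈ l) (hlb : ∀ x ∈ l, c ≤ x) :
    (PySem.List.min? l (fun x => x)).getD 0 = c := by
  cases h : PySem.List.min? l (fun x => x) with
  | none =>
    rw [(PySem.List.min?_eq_none_iff _ _).mp h] at hc
    simp at hc
  | some m =>
    have hm := PySem.List.min?_mem h
    have hmin := PySem.List.min?_isMin h
    simpa using le_antisymm (hmin c hc) (hlb m hm)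

-- enumerate over a range-comprehension
theorem enumerate_map_pyRange (v : Int → Int) (n : Nat) :
    PySem.List.enumerate ((PySem.List.pyRange 0 (n : Int) 1).map v) =
      (PySem.List.pyRange 0 (n : Int) 1).map (fun j => (j, v j)) := by
  rw [PySem.List.enumerate_eq_map_pyRange _ 0]
  have hlen : PySem.List.len ((PySem.List.pyRange 0 (n : Int) 1).map v) = (n : Int) := by
    simp [PySem.List.length_pyRange_one]
  rw [hlen]
  apply List.map_congr_left
  intro j hj
  obtain ⟨h0, h1⟩ := PySem.List.mem_pyRange_one.mp hj
  rw [PySem.List.pyGetD_map_pyRange_of_nonneg v _ j 0 h0 h1]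

-- sums.index(min(sums)) picks the first index whose key attains the minimum
theorem first_min_pick :
    ∀ (I : List Int) (s : Int → Int) (m c : Int), I.Pairwise (· < ·) → m ∈ I → s m = c →
      (∀ j ∈ I, j < m → s j ≠ c) →
      I.getD ((PySem.List.index? (I.map s) c).getD 0) 0 = m := by
  intro I
  induction I with
  | nil => intro s m c _ hm; simp at hm
  | cons a I ih =>
    intro s m c hp hm hc hbef
    by_cases ham : a = m
    · subst ham
      rw [List.map_cons, hc, PySem.List.index?_cons_self]
      simp
    · have hmI : m ∈ I := by
        cases List.mem_cons.mp hm with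
        | inl h => exact absurd h.symm ham
        | inr h => exact h
      have ham' : a < m := (List.pairwise_cons.mp hp).1 m hmI
      have hane : s a ≠ c := hbef a (List.mem_cons_self) ham'
      obtain ⟨k, hk⟩ := Option.isSome_iff_exists.mp
        ((PySem.List.index?_isSome_iff _ _).mpr (List.mem_map.mpr ⟨m, hmI, hc⟩))
      rw [List.map_cons, PySem.List.index?_cons_of_ne (I.map s) hane, hk]
      simp only [Option.map_some, Option.getD_some, List.getD_cons_succ]
      have := ih s m c (List.pairwise_cons.mp hp).2 hmI hc
        (fun j hj hjm => hbef j (List.mem_cons_of_mem _ hj) hjm)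
      rw [hk] at this
      simpa using this

theorem B_eq (r0 : List Int) (rest : List (List Int)) (vt : Int) (h0 : r0 ≠ []) :
    FewestVetos_alt (r0 :: rest) vt =
      colF (r0 :: rest) (bestUpto (keyF (r0 :: rest) (vt - 1)) r0.length) := by
  have hn : 1 ≤ r0.length := List.length_pos_iff.mpr h0
  simp only [FewestVetos_alt, PySem.List.pyGetD_zero_cons]
  simp only [fold_key]
  rw [foldB (keyF (r0 :: rest) (vt - 1)) r0.length hn]
  rfl

theorem A_eq (r0 : List Int) (rest : List (List Int)) (vt : Int) (h0 : r0 ≠ []) :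
    FewestVetos (r0 :: rest) vt =
      colF (r0 :: rest) (bestUpto (keyF (r0 :: rest) (vt - 1)) r0.length) := by
  have hn : 1 ≤ r0.length := List.length_pos_iff.mpr h0
  obtain ⟨⟨hm0, hmn⟩, hle, hlt⟩ := bestUpto_spec (keyF (r0 :: rest) (vt - 1)) r0.length hn
  set g := keyF (r0 :: rest) (vt - 1) with hg
  set n := r0.length with hnn
  set m := bestUpto g n with hm
  have hcd : createDistributions (r0 :: rest) =
      (PySem.List.pyRange 0 (n : Int) 1).map (colF (r0 :: rest)) := by
    simp only [createDistributions, PySem.List.pyGetD_zero_cons,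
      PySem.List.foldl_append_singleton_eq_map, List.nil_append]
    rfl
  simp only [FewestVetos, hcd, PySem.List.foldl_append_singleton_eq_map,
    List.nil_append, List.map_map]
  have hvc : (PySem.List.pyRange 0 (n : Int) 1).map
      ((fun d => ((List.filter (fun i => decide (vt - 1 ≤ i)) d).length : Int)) ∘ colF (r0 :: rest)) =
      (PySem.List.pyRange 0 (n : Int) 1).map (fun i => (g i).1) := by
    apply List.map_congr_left
    intro i _
    exact filter_len_eq_key1 (r0 :: rest) (vt - 1) i
  rw [hvc]
  have hmmem : (m : Int) ∈ PySem.List.pyRange 0 (n : Int) 1 :=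
    PySem.List.mem_pyRange_one.mpr ⟨hm0, hmn⟩
  have hminim : (PySem.List.min? ((PySem.List.pyRange 0 (n : Int) 1).map (fun i => (g i).1))
      (fun x => x)).getD 0 = (g m).1 := by
    apply min?_id_eq
    · exact List.mem_map.mpr ⟨m, hmmem, rfl⟩
    · intro x hx
      obtain ⟨j, hj, rfl⟩ := List.mem_map.mp hx
      obtain ⟨hj0, hj1⟩ := PySem.List.mem_pyRange_one.mp hj
      exact LexLe_fst (hle j hj0 hj1)
  rw [hminim, enumerate_map_pyRange, List.filter_map, List.map_map]
  have hproj : ∀ (l : List Int),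
      (l.map ((fun (p : Int × Int) => p.1) ∘ (fun j => (j, (g j).1)))) = l := by
    intro l; simp [Function.comp_def]
  rw [hproj]
  set I := (PySem.List.pyRange 0 (n : Int) 1).filter
    ((fun (p : Int × Int) => p.2 == (g m).1) ∘ (fun j => (j, (g j).1))) with hI
  have hImem : ∀ j ∈ I, (0 ≤ j ∧ j < (n : Int)) ∧ (g j).1 = (g m).1 := by
    intro j hj
    obtain ⟨hjr, hjb⟩ := List.mem_filter.mp hj
    exact ⟨PySem.List.mem_pyRange_one.mp hjr, by simpa using hjb⟩
  have hmI : m ∈ I := by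
    rw [hI]
    exact List.mem_filter.mpr ⟨hmmem, by simp⟩
  have hfinal : PySem.List.pyGetD ((PySem.List.pyRange 0 (n : Int) 1).map (colF (r0 :: rest)))
      (m : Int) [] = colF (r0 :: rest) m :=
    PySem.List.pyGetD_map_pyRange_of_nonneg _ _ _ _ hm0 hmn
  by_cases hlen1 : I.length = 1
  · rw [if_pos hlen1]
    obtain ⟨x, hx⟩ := List.length_eq_one_iff.mp hlen1
    rw [hx] at hmI
    simp only [List.mem_singleton] at hmI
    rw [hx, ← hmI]
    simpa using hfinal
  · rw [if_neg hlen1]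
    simp only [List.map_map]
    have hsums : I.map (((fun x => (PySem.List.pyGetD
          ((PySem.List.pyRange 0 (n : Int) 1).map (colF (r0 :: rest))) x []).sum) ∘
          (fun (p : Int × Int) => p.1)) ∘ (fun j => (j, (g j).1))) =
        I.map (fun j => (g j).2) := by
      apply List.map_congr_left
      intro j hj
      obtain ⟨⟨hj0, hj1⟩, _⟩ := hImem j hj
      simp only [Function.comp_apply]
      rw [PySem.List.pyGetD_map_pyRange_of_nonneg _ _ _ _ hj0 hj1]
      rfl
    simp only [hsums]
    have hminS : (PySem.List.min? (I.map (fun j => (g j).2)) (fun x => x)).getD 0 = (g m).2 := by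
      apply min?_id_eq
      · exact List.mem_map.mpr ⟨m, hmI, rfl⟩
      · intro x hx
        obtain ⟨j, hj, rfl⟩ := List.mem_map.mp hx
        obtain ⟨⟨hj0, hj1⟩, hjfst⟩ := hImem j hj
        exact LexLe_snd_of_fst_eq (hle j hj0 hj1) hjfst.symm
    rw [hminS, PySem.List.pyGetD_natCast]
    have hIpair : I.Pairwise (· < ·) :=
      List.Pairwise.filter _ (PySem.List.pairwise_lt_pyRange_one 0 (n : Int))
    have hpick := first_min_pick I (fun j => (g j).2) m ((g m).2) hIpair hmI rfl
      (fun j hj hjm => by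
        obtain ⟨⟨hj0, _⟩, hjfst⟩ := hImem j hj
        have := LexLt_snd_of_fst_eq (hlt j hj0 hjm) hjfst.symm
        exact ne_of_gt this)
    rw [hpick]
    exact hfinal

theorem FewestVetos_spec : Claim_equal_FewestVetos := by
  intro rankVectors vetoThreshold _ hpre
  obtain ⟨hne, hhd, -⟩ := hpre
  cases rankVectors with
  | nil => exact absurd rfl hne
  | cons r0 rest =>
    simp only [List.headD_cons] at hhd
    unfold Spec_FewestVetos
    rw [A_eq r0 rest vetoThreshold hhd, B_eq r0 rest vetoThreshold hhd]
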